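-- pv_equiv track=rewrite | github.com/socna/rlcard | rlcard/games/dummy/melding.py | get_all_run_melds
-- ===== SOURCE A (Python) =====
-- from typing import List
--
-- def get_suit_id(card_id: int):
--     return card_id // 13
--
-- def get_rank_id(card_id: int):
--     return card_id % 13
--
-- def get_all_run_melds(cards : List[int]):
--     card_count = len(cards)
--     hand_by_suit = sorted(cards, key=lambda x: (get_suit_id(x), get_rank_id(x)))
--     max_run_melds = []
--
--     i = 0
--     while(i < card_count - 2):
--         card_i = hand_by_suit[i]
--         j = i + 1
--         card_j = hand_by_suit[j]
--
--         while get_rank_id(card_j) == get_rank_id(card_i) + j - i and get_suit_id(card_i) == get_suit_id(card_j):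
--             j += 1
--             if j < card_count:
--                 card_j = hand_by_suit[j]
--             else:
--                 break
--
--         max_run_meld = hand_by_suit[i:j]
--         if len(max_run_meld) >= 3:
--             max_run_melds.append(max_run_meld)
--         i = j
--
--     result = []
--     for max_run_meld in max_run_melds:
--         max_run_meld_count = len(max_run_meld)
--         for i in range(max_run_meld_count - 2):
--             for j in range(i + 3, max_run_meld_count + 1):
--                 result.append(max_run_meld[i:j])
--     return result
-- ===== SOURCE B (Python) =====
-- from typing import List
--
-- def get_all_run_melds(cards: List[int]):
--     hand = sorted(cards, key=lambda x: (x // 13, x % 13))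
--     n = len(hand)
--     result = []
--     for s in range(n):
--         e = s
--         while e + 1 < n and hand[e + 1] // 13 == hand[e] // 13 and hand[e + 1] % 13 == hand[e] % 13 + 1:
--             e += 1
--         for end in range(s + 3, e + 2):
--             result.append(hand[s:end])
--     return result
-- ===== Notes on version B (the rewrite author's own statement) =====
-- stated objective: simpler
-- what changed: B drops A's two-phase structure (collect maximal runs into an intermediate list, then expand each with a triple-nested loop): it walks each start index once, extends an end pointer while the run continues, and emits the sub-run slices directly, with no intermediate list of maximal melds and no helper functions.
import Mathlib
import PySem

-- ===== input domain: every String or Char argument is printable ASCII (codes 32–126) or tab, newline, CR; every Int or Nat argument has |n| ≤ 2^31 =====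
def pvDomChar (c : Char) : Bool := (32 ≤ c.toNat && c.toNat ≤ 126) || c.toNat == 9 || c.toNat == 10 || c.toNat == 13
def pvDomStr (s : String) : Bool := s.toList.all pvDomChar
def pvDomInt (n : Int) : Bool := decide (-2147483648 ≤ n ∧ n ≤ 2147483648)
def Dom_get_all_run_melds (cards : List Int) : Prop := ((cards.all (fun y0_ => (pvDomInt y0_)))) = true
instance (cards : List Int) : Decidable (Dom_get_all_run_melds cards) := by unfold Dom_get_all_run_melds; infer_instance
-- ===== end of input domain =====

-- B enumerates the sub-runs in one pass (end pointer per start), replacing A's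
-- intermediate list of maximal runs and its separate triple-nested expansion phase.

-- ===== PORT A =====
def get_suit_id (card_id : Int) : Int := PySem.Int.floordiv card_id 13

def get_rank_id (card_id : Int) : Int := PySem.Int.mod card_id 13

-- A's inner while: advance j while hand_by_suit[j] continues the run begun at card_i
-- (the Python only evaluates the condition at j < len; indices are in range there, getD never defaults)
def pvInnerA (hbs : List Int) (cardi : Int) (i : Nat) (j : Nat) : Nat :=
  if _h : j < hbs.length then
    if get_rank_id (hbs.getD j 0) = get_rank_id cardi + ((j : Int) - (i : Int)) ∧
        get_suit_id cardi = get_suit_id (hbs.getD j 0) then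
      pvInnerA hbs cardi i (j + 1)
    else j
  else j
termination_by hbs.length - j

theorem pvInnerA_ge (hbs : List Int) (cardi : Int) (i : Nat) (j : Nat) :
    j ≤ pvInnerA hbs cardi i j := by
  rw [pvInnerA]
  split
  · split
    · exact le_trans (Nat.le_succ j) (pvInnerA_ge hbs cardi i (j + 1))
    · exact le_refl j
  · exact le_refl j
termination_by hbs.length - j

-- A's outer while: collect the maximal runs, i jumping to j
def pvOuterA (hbs : List Int) (i : Nat) : List (List Int) :=
  if _h : i < hbs.length - 2 then
    let j := pvInnerA hbs (hbs.getD i 0) i (i + 1)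
    let meld := PySem.List.slice hbs (some (i : Int)) (some (j : Int))
    (if 3 ≤ meld.length then [meld] else []) ++ pvOuterA hbs j
  else []
termination_by hbs.length - i
decreasing_by
  have := pvInnerA_ge hbs (hbs.getD i 0) i (i + 1)
  omega

-- A's second phase: expand one maximal run into all its sub-runs
def pvExpandA (meld : List Int) : List (List Int) :=
  (PySem.List.pyRange 0 ((meld.length : Int) - 2) 1).flatMap (fun t =>
    (PySem.List.pyRange (t + 3) ((meld.length : Int) + 1) 1).map (fun u =>
      PySem.List.slice meld (some t) (some u)))

def get_all_run_melds (cards : List Int) : List (List Int) :=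
  let hand_by_suit := PySem.List.sorted2 cards get_suit_id get_rank_id
  (pvOuterA hand_by_suit 0).flatMap pvExpandA

-- ===== PORT B =====
-- B's while-condition: hand[e+1] continues the run at hand[e]
def pvCond (hand : List Int) (e : Nat) : Bool :=
  decide (e + 1 < hand.length) &&
    (PySem.Int.floordiv (hand.getD (e + 1) 0) 13 == PySem.Int.floordiv (hand.getD e 0) 13) &&
    (PySem.Int.mod (hand.getD (e + 1) 0) 13 == PySem.Int.mod (hand.getD e 0) 13 + 1)

-- B's inner while: extend the end pointer
def pvRunB (hand : List Int) (e : Nat) : Nat :=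
  if h : pvCond hand e = true then pvRunB hand (e + 1) else e
termination_by hand.length - e
decreasing_by
  simp only [pvCond, Bool.and_eq_true, decide_eq_true_eq] at h
  omega

-- body of B's for-loop over start index s
def pvEmitB (hand : List Int) (s : Nat) : List (List Int) :=
  (PySem.List.pyRange ((s : Int) + 3) ((pvRunB hand s : Int) + 2) 1).map (fun en =>
    PySem.List.slice hand (some (s : Int)) (some en))

def get_all_run_melds_alt (cards : List Int) : List (List Int) :=
  let hand := PySem.List.sorted2 cards (fun x => PySem.Int.floordiv x 13) (fun x => PySem.Int.mod x 13)
  (List.range hand.length).flatMap (pvEmitB hand)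

-- ===== PRECONDITION & SPEC =====
def Spec_get_all_run_melds (cards : List Int) (out : List (List Int)) : Prop := out = get_all_run_melds_alt cards
instance (cards : List Int) (out : List (List Int)) : Decidable (Spec_get_all_run_melds cards out) := by unfold Spec_get_all_run_melds; infer_instance

-- ===== CLAIM (what is proved, stated in full; the proofs are below) =====
def Claim_equal_get_all_run_melds : Prop := ∀ (cards : List Int), Dom_get_all_run_melds cards → Spec_get_all_run_melds cards (get_all_run_melds cards)

-- ===== LEMMAS AND PROOFS =====

theorem pvRunB_ge (hand : List Int) (e : Nat) : e ≤ pvRunB hand e := by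
  rw [pvRunB]
  split
  · exact le_trans (Nat.le_succ e) (pvRunB_ge hand (e + 1))
  · exact le_refl e
termination_by hand.length - e
decreasing_by
  rename_i h; simp only [pvCond, Bool.and_eq_true, decide_eq_true_eq] at h; omega

theorem pvRunB_lt (hand : List Int) (e : Nat) (h : e < hand.length) : pvRunB hand e < hand.length := by
  rw [pvRunB]
  split
  · rename_i hc
    simp only [pvCond, Bool.and_eq_true, decide_eq_true_eq] at hc
    exact pvRunB_lt hand (e + 1) hc.1.1
  · exact h
termination_by hand.length - e
decreasing_by
  rename_i hc; simp only [pvCond, Bool.and_eq_true, decide_eq_true_eq] at hc; omega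

theorem pvRunB_cond (hand : List Int) (e : Nat) (h : pvCond hand e = true) :
    pvRunB hand e = pvRunB hand (e + 1) := by
  rw [pvRunB]; simp [h]

theorem pvRunB_not_cond (hand : List Int) (e : Nat) (h : ¬ pvCond hand e = true) :
    pvRunB hand e = e := by
  rw [pvRunB]; simp [h]

theorem pvRunB_stable (hand : List Int) (i s : Nat) (h1 : i ≤ s) (h2 : s ≤ pvRunB hand i) :
    pvRunB hand s = pvRunB hand i := by
  rcases Nat.eq_or_lt_of_le h1 with rfl | hlt
  · rfl
  · have hc : pvCond hand i = true := by
      by_contra hc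
      rw [pvRunB_not_cond hand i hc] at h2
      omega
    rw [pvRunB_cond hand i hc] at h2 ⊢
    exact pvRunB_stable hand (i + 1) s hlt h2
termination_by s - i

theorem innerA_eq (hand : List Int) (i k : Nat) (hik : i ≤ k)
    (hmod : get_rank_id (hand.getD k 0) = get_rank_id (hand.getD i 0) + ((k : Int) - (i : Int)))
    (hsuit : get_suit_id (hand.getD i 0) = get_suit_id (hand.getD k 0)) :
    pvInnerA hand (hand.getD i 0) i (k + 1) = pvRunB hand k + 1 := by
  rw [pvInnerA]
  split
  · rename_i hlen
    split
    · rename_i hcA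
      have hsuit' : get_suit_id (hand.getD (k + 1) 0) = get_suit_id (hand.getD k 0) := by
        rw [← hsuit]; exact hcA.2.symm
      have hmod' : get_rank_id (hand.getD (k + 1) 0) = get_rank_id (hand.getD k 0) + 1 := by
        have h1 := hcA.1
        push_cast at h1
        rw [h1, hmod]; ring
      have hcB : pvCond hand k = true := by
        simp only [pvCond, Bool.and_eq_true, decide_eq_true_eq, beq_iff_eq]
        refine ⟨⟨hlen, ?_⟩, ?_⟩
        · simpa [get_suit_id] using hsuit'
        · simpa [get_rank_id] using hmod'
      rw [pvRunB_cond hand k hcB]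
      exact innerA_eq hand i (k + 1) (by omega) hcA.1 hcA.2
    · rename_i hcA
      have hcB : ¬ pvCond hand k = true := by
        intro hc
        simp only [pvCond, Bool.and_eq_true, decide_eq_true_eq, beq_iff_eq] at hc
        apply hcA
        constructor
        · have h2 : get_rank_id (hand.getD (k + 1) 0) = get_rank_id (hand.getD k 0) + 1 := by
            simpa [get_rank_id] using hc.2
          push_cast
          rw [h2, hmod]; ring
        · rw [hsuit]
          have : get_suit_id (hand.getD (k + 1) 0) = get_suit_id (hand.getD k 0) := by
            simpa [get_suit_id] using hc.1.2
          exact this.symm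
      rw [pvRunB_not_cond hand k hcB]
  · rename_i hlen
    have hcB : ¬ pvCond hand k = true := by
      intro hc
      simp only [pvCond, Bool.and_eq_true, decide_eq_true_eq, beq_iff_eq] at hc
      exact hlen hc.1.1
    rw [pvRunB_not_cond hand k hcB]
termination_by hand.length - k

theorem emitB_range (hand : List Int) (s : Nat) :
    pvEmitB hand s = (List.range (pvRunB hand s - s - 1)).map (fun m =>
      PySem.List.slice hand (some (s : Int)) (some ((s + 3 + m : Nat) : Int))) := by
  unfold pvEmitB
  rw [PySem.List.pyRange_one, List.map_map]
  have harg : (((pvRunB hand s : Nat) : Int) + 2 - ((s : Int) + 3)).toNat = pvRunB hand s - s - 1 := by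
    omega
  rw [harg]
  apply List.map_congr_left
  intro m _
  simp only [Function.comp_apply]
  have hc : ((s : Int) + 3 + (m : Int)) = ((s + 3 + m : Nat) : Int) := by push_cast; ring
  rw [hc]

theorem emit_zero (hand : List Int) (s : Nat) (h : pvRunB hand s ≤ s + 1) : pvEmitB hand s = [] := by
  rw [emitB_range]
  have h0 : pvRunB hand s - s - 1 = 0 := by omega
  rw [h0]
  rfl

theorem slice_sub (hand : List Int) (i e k m : Nat)
    (hk : k + 3 + m ≤ e + 1 - i) :
    PySem.List.slice (PySem.List.slice hand (some (i : Int)) (some ((e + 1 : Nat) : Int)))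
        (some (k : Int)) (some ((k + 3 + m : Nat) : Int))
      = PySem.List.slice hand (some ((i + k : Nat) : Int)) (some ((i + k + 3 + m : Nat) : Int)) := by
  rw [PySem.List.slice_natCast, PySem.List.slice_natCast, PySem.List.slice_natCast]
  rw [List.drop_take, List.drop_drop, List.take_take]
  congr 1
  omega

theorem chain_eq (hand : List Int) (i : Nat) (hi : i < hand.length) :
    (if 3 ≤ (PySem.List.slice hand (some (i : Int)) (some ((pvRunB hand i + 1 : Nat) : Int))).length
      then [PySem.List.slice hand (some (i : Int)) (some ((pvRunB hand i + 1 : Nat) : Int))]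
      else []).flatMap pvExpandA
    = (List.range' i (pvRunB hand i + 1 - i)).flatMap (pvEmitB hand) := by
  have he1 : i ≤ pvRunB hand i := pvRunB_ge hand i
  have he2 : pvRunB hand i < hand.length := pvRunB_lt hand i hi
  set e := pvRunB hand i with he
  set L := e + 1 - i with hL
  have hmeld : PySem.List.slice hand (some (i : Int)) (some ((e + 1 : Nat) : Int))
      = (hand.drop i).take L := by
    rw [PySem.List.slice_natCast]
  have hmlen : ((hand.drop i).take L).length = L := by
    simp only [List.length_take, List.length_drop]
    omega
  have hrhs : (List.range' i L).flatMap (pvEmitB hand)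
      = (List.range L).flatMap (fun t => (List.range (L - t - 2)).map (fun m =>
          PySem.List.slice hand (some ((i + t : Nat) : Int)) (some ((i + t + 3 + m : Nat) : Int)))) := by
    rw [List.range'_eq_map_range, List.flatMap_map]
    apply List.flatMap_congr
    intro t ht
    rw [List.mem_range] at ht
    have hstable : pvRunB hand (i + t) = e := by
      apply pvRunB_stable hand i (i + t) (by omega) (by omega)
    rw [emitB_range, hstable]
    have : e - (i + t) - 1 = L - t - 2 := by omega
    rw [this]
  rw [hrhs, hmeld]
  by_cases h3 : 3 ≤ L
  · rw [hmlen, if_pos h3]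
    have hlhs : [(hand.drop i).take L].flatMap pvExpandA = pvExpandA ((hand.drop i).take L) := by
      simp
    rw [hlhs]
    unfold pvExpandA
    rw [hmlen]
    rw [PySem.List.pyRange_one, List.flatMap_map]
    have harg : (((L : Int) - 2) - 0).toNat = L - 2 := by omega
    rw [harg]
    have hrange : List.range L = List.range (L - 2) ++ (List.range 2).map ((L - 2) + ·) := by
      conv_lhs => rw [show L = (L - 2) + 2 from by omega]
      exact List.range_add
    rw [hrange, List.flatMap_append]
    have hnil : ((List.range 2).map ((L - 2) + ·)).flatMap
        (fun t => (List.range (L - t - 2)).map (fun m =>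
          PySem.List.slice hand (some ((i + t : Nat) : Int)) (some ((i + t + 3 + m : Nat) : Int)))) = [] := by
      apply List.flatMap_eq_nil_iff.mpr
      intro t ht
      simp only [List.mem_map, List.mem_range] at ht
      obtain ⟨a, ha, rfl⟩ := ht
      have : L - ((L - 2) + a) - 2 = 0 := by omega
      rw [this]
      rfl
    rw [hnil, List.append_nil]
    apply List.flatMap_congr
    intro k hk
    rw [List.mem_range] at hk
    rw [PySem.List.pyRange_one, List.map_map]
    have harg2 : (((L : Int) + 1) - ((0 + (k : Int)) + 3)).toNat = L - k - 2 := by omega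
    rw [harg2]
    apply List.map_congr_left
    intro m hm
    rw [List.mem_range] at hm
    simp only [Function.comp_apply]
    have hcast1 : (0 + (k : Int)) = ((k : Nat) : Int) := by ring
    have hcast2 : ((k : Int) + 3 + (m : Int)) = ((k + 3 + m : Nat) : Int) := by push_cast; ring
    rw [hcast1, hcast2, ← hmeld]
    exact slice_sub hand i e k m (by omega)
  · rw [hmlen, if_neg h3]
    rw [List.flatMap_nil]
    symm
    apply List.flatMap_eq_nil_iff.mpr
    intro t ht
    rw [List.mem_range] at ht
    have : L - t - 2 = 0 := by omega
    rw [this]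
    rfl

theorem mainA (hand : List Int) (i : Nat) :
    (pvOuterA hand i).flatMap pvExpandA
      = (List.range' i (hand.length - i)).flatMap (pvEmitB hand) := by
  rw [pvOuterA]
  split
  · rename_i hlt
    have hi : i < hand.length := by omega
    have hj : pvInnerA hand (hand.getD i 0) i (i + 1) = pvRunB hand i + 1 :=
      innerA_eq hand i i (le_refl i) (by ring) rfl
    simp only [hj]
    have he1 : i ≤ pvRunB hand i := pvRunB_ge hand i
    have he2 : pvRunB hand i < hand.length := pvRunB_lt hand i hi
    have hsplit : List.range' i (hand.length - i)
        = List.range' i (pvRunB hand i + 1 - i)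
          ++ List.range' (pvRunB hand i + 1) (hand.length - (pvRunB hand i + 1)) := by
      have h1 : hand.length - i = (pvRunB hand i + 1 - i) + (hand.length - (pvRunB hand i + 1)) := by
        omega
      have h2 : pvRunB hand i + 1 = i + (pvRunB hand i + 1 - i) := by omega
      rw [h1, Eq.symm List.range'_append_1, ← h2]
    rw [hsplit, List.flatMap_append, List.flatMap_append]
    congr 1
    · exact chain_eq hand i hi
    · exact mainA hand (pvRunB hand i + 1)
  · rename_i hge
    rw [List.flatMap_nil]
    symm
    apply List.flatMap_eq_nil_iff.mpr
    intro s hs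
    rw [List.mem_range'_1] at hs
    apply emit_zero
    have := pvRunB_lt hand s (by omega)
    omega
termination_by hand.length - i
decreasing_by
  have := pvRunB_ge hand i
  omega

-- ===== VERDICT (by name: the statement is the Claim_ definition above) =====
theorem get_all_run_melds_spec : Claim_equal_get_all_run_melds := by
  intro cards _
  unfold Spec_get_all_run_melds get_all_run_melds get_all_run_melds_alt
  show (pvOuterA (PySem.List.sorted2 cards get_suit_id get_rank_id) 0).flatMap pvExpandA
      = (List.range (PySem.List.sorted2 cards get_suit_id get_rank_id).length).flatMap
          (pvEmitB (PySem.List.sorted2 cards get_suit_id get_rank_id))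
  rw [List.range_eq_range']
  have := mainA (PySem.List.sorted2 cards get_suit_id get_rank_id) 0
  simpa using this
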